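-- pv_equiv track=rewrite | github.com/furkanercan/POCO | src/lib/supp/create_decoding_schedule.py | create_decoding_direction
-- ===== SOURCE A (Python) =====
-- import math
--
-- def create_decoding_direction(vec_sch, vec_stagesize, sch_limit):
--
--     combine_ctr =  [0] * (sch_limit + 1)
--     hard_dec_ctr = [0] * (sch_limit + 1)
--     sc_direction = []
--
--     for i in range(len(vec_sch)):
--         if vec_sch[i] == 'C':
--             sc_direction.append(combine_ctr[math.floor(math.log2(vec_stagesize[i]))] % 2)
--             combine_ctr[math.floor(math.log2(vec_stagesize[i]))] += 1
--         elif vec_sch[i] == 'H':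
--             sc_direction.append(hard_dec_ctr[math.floor(math.log2(vec_stagesize[i]))] % 2)
--             hard_dec_ctr[math.floor(math.log2(vec_stagesize[i]))] += 1
--         else:
--             sc_direction.append(0)
--     return sc_direction
-- ===== SOURCE B (Python) =====
-- import math
--
-- def create_decoding_direction(vec_sch, vec_stagesize, sch_limit):
--     # Stateless re-implementation: the direction of a 'C'/'H' step is simply
--     # the parity of the number of earlier steps of the same type on the same
--     # log2-stage; everything else is 0.
--     def key(i):
--         return math.floor(math.log2(vec_stagesize[i]))
--     return [
--         sum(1 for j in range(i) if vec_sch[j] == s and key(j) == key(i)) % 2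
--         if s in ('C', 'H') else 0
--         for i, s in enumerate(vec_sch)
--     ]
-- ===== Notes on version B (the rewrite author's own statement) =====
-- stated objective: alternative
-- what changed: Replaces A's mutable per-stage parity counter arrays (sized by sch_limit) with a stateless comprehension that, for each 'C'/'H' position, counts earlier occurrences of the same (type, floor-log2-stage) pair and takes its parity.
import Mathlib
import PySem

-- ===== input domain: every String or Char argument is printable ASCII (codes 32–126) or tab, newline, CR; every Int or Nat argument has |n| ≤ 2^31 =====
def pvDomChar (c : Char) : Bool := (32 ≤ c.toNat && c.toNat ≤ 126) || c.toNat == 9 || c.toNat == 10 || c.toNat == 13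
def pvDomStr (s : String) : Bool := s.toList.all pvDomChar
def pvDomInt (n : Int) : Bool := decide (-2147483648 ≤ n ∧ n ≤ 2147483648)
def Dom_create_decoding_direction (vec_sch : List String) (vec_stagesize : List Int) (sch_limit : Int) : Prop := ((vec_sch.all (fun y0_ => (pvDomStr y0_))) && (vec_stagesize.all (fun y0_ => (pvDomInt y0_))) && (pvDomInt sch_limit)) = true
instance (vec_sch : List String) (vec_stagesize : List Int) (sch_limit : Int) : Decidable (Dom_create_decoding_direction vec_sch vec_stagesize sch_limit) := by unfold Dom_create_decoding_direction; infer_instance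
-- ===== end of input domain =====

-- B replaces A's mutable per-stage parity counters with a stateless per-index
-- count of earlier same-(type, stage) occurrences; alternative decomposition, same result.

-- ===== PORT A =====
-- math.floor(math.log2 n); exact for 1 ≤ n ≤ 2^31 (Pre_ admits only such stage sizes at 'C'/'H' steps)
def pvFlog2A (n : Int) : Nat := Nat.log2 n.toNat

-- one iteration of A's for-loop: state = (combine_ctr, hard_dec_ctr, sc_direction)
def pvStepA (vec_sch : List String) (vec_stagesize : List Int)
    (st : List Int × List Int × List Int) (i : Nat) : List Int × List Int × List Int :=
  let s := vec_sch.getD i ""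
  if s = "C" then
    let k := pvFlog2A (vec_stagesize.getD i 0)
    (st.1.set k (st.1.getD k 0 + 1), st.2.1, st.2.2 ++ [st.1.getD k 0 % 2])
  else if s = "H" then
    let k := pvFlog2A (vec_stagesize.getD i 0)
    (st.1, st.2.1.set k (st.2.1.getD k 0 + 1), st.2.2 ++ [st.2.1.getD k 0 % 2])
  else
    (st.1, st.2.1, st.2.2 ++ [(0 : Int)])

def create_decoding_direction (vec_sch : List String) (vec_stagesize : List Int) (sch_limit : Int) : List Int :=
  -- [0] * (sch_limit + 1) : empty when sch_limit + 1 ≤ 0, as in Python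
  let combine_ctr : List Int := List.replicate (sch_limit + 1).toNat 0
  let hard_dec_ctr : List Int := List.replicate (sch_limit + 1).toNat 0
  ((List.range vec_sch.length).foldl (pvStepA vec_sch vec_stagesize)
    (combine_ctr, hard_dec_ctr, [])).2.2

-- ===== PORT B =====
-- key(i) = math.floor(math.log2(vec_stagesize[i])); exact on Pre_'s stage sizes
def pvKeyB (vec_stagesize : List Int) (i : Nat) : Nat := Nat.log2 (vec_stagesize.getD i 0).toNat

def create_decoding_direction_alt (vec_sch : List String) (vec_stagesize : List Int) (sch_limit : Int) : List Int :=
  (List.range vec_sch.length).map (fun i =>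
    let s := vec_sch.getD i ""
    if s = "C" ∨ s = "H" then
      (Int.ofNat ((List.range i).countP
        (fun j => vec_sch.getD j "" = s ∧ pvKeyB vec_stagesize j = pvKeyB vec_stagesize i))) % 2
    else 0)

-- ===== PRECONDITION & SPEC =====
-- Pre_: exactly the inputs on which A returns normally: every 'C'/'H' step has a
-- stage size (IndexError otherwise), the stage size is ≥ 1 (math.log2 ValueError
-- otherwise) and its floor-log2 fits in the counter arrays (IndexError otherwise).
def Pre_create_decoding_direction (vec_sch : List String) (vec_stagesize : List Int) (sch_limit : Int) : Prop :=
  ∀ i < vec_sch.length, (vec_sch.getD i "" = "C" ∨ vec_sch.getD i "" = "H") →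
    i < vec_stagesize.length ∧ 1 ≤ vec_stagesize.getD i 0 ∧
      (Nat.log2 (vec_stagesize.getD i 0).toNat : Int) ≤ sch_limit
instance (vec_sch : List String) (vec_stagesize : List Int) (sch_limit : Int) : Decidable (Pre_create_decoding_direction vec_sch vec_stagesize sch_limit) := by unfold Pre_create_decoding_direction; infer_instance

def pvWitness_create_decoding_direction : List String × List Int × Int :=
  (["C", "H", "F", "C", "C", "H"], [4, 4, 0, 4, 8, 4], 3)

def Spec_create_decoding_direction (vec_sch : List String) (vec_stagesize : List Int) (sch_limit : Int) (out : List Int) : Prop := out = create_decoding_direction_alt vec_sch vec_stagesize sch_limit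
instance (vec_sch : List String) (vec_stagesize : List Int) (sch_limit : Int) (out : List Int) : Decidable (Spec_create_decoding_direction vec_sch vec_stagesize sch_limit out) := by unfold Spec_create_decoding_direction; infer_instance

-- ===== CLAIM (what is proved, stated in full; the proofs are below) =====
def Claim_equal_create_decoding_direction : Prop := ∀ (vec_sch : List String) (vec_stagesize : List Int) (sch_limit : Int), Dom_create_decoding_direction vec_sch vec_stagesize sch_limit → Pre_create_decoding_direction vec_sch vec_stagesize sch_limit → Spec_create_decoding_direction vec_sch vec_stagesize sch_limit (create_decoding_direction vec_sch vec_stagesize sch_limit)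

-- ===== LEMMAS AND PROOFS =====

-- number of j < m with schedule letter s and stage key k
def pvCnt (vec_sch : List String) (vec_stagesize : List Int) (s : String) (m k : Nat) : Nat :=
  (List.range m).countP (fun j => vec_sch.getD j "" = s ∧ pvKeyB vec_stagesize j = k)

-- A's loop state after m iterations
def pvFoldA (vec_sch : List String) (vec_stagesize : List Int) (N m : Nat) :
    List Int × List Int × List Int :=
  (List.range m).foldl (pvStepA vec_sch vec_stagesize)
    (List.replicate N (0 : Int), List.replicate N (0 : Int), [])

theorem pvFoldA_succ (vec_sch : List String) (vec_stagesize : List Int) (N m : Nat) :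
    pvFoldA vec_sch vec_stagesize N (m + 1) =
      pvStepA vec_sch vec_stagesize (pvFoldA vec_sch vec_stagesize N m) m := by
  simp [pvFoldA, List.range_succ]

-- B's value at position i
def pvValB (vec_sch : List String) (vec_stagesize : List Int) (i : Nat) : Int :=
  let s := vec_sch.getD i ""
  if s = "C" ∨ s = "H" then
    (Int.ofNat ((List.range i).countP
      (fun j => vec_sch.getD j "" = s ∧ pvKeyB vec_stagesize j = pvKeyB vec_stagesize i))) % 2
  else 0

theorem pvCnt_succ (vec_sch : List String) (vec_stagesize : List Int) (s : String) (m k : Nat) :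
    pvCnt vec_sch vec_stagesize s (m + 1) k =
      pvCnt vec_sch vec_stagesize s m k +
        (if vec_sch.getD m "" = s ∧ pvKeyB vec_stagesize m = k then 1 else 0) := by
  simp only [pvCnt, List.range_succ, List.countP_append, List.countP_cons, List.countP_nil]
  by_cases h : (vec_sch.getD m "" = s ∧ pvKeyB vec_stagesize m = k) <;> simp [h]

theorem pv_getD_set (l : List Int) (k k' : Nat) (v : Int) :
    (l.set k v).getD k' 0 = if k = k' ∧ k < l.length then v else l.getD k' 0 := by
  split_ifs with h
  · obtain ⟨rfl, hk⟩ := h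
    simp [List.getD, List.getElem?_set_self hk]
  · rcases Decidable.em (k = k') with rfl | hne
    · have hk : ¬ k < l.length := by tauto
      simp [List.set_eq_of_length_le (Nat.le_of_not_lt hk)]
    · simp [List.getD, List.getElem?_set_ne hne]

-- the loop invariant: counters count earlier same-key occurrences, output agrees with B
theorem pvInvariant (vec_sch : List String) (vec_stagesize : List Int) (sch_limit : Int)
    (hpre : Pre_create_decoding_direction vec_sch vec_stagesize sch_limit)
    (m : Nat) (hm : m ≤ vec_sch.length) :
    (pvFoldA vec_sch vec_stagesize (sch_limit + 1).toNat m).1.length = (sch_limit + 1).toNat ∧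
    (pvFoldA vec_sch vec_stagesize (sch_limit + 1).toNat m).2.1.length = (sch_limit + 1).toNat ∧
    (∀ k : Nat, (pvFoldA vec_sch vec_stagesize (sch_limit + 1).toNat m).1.getD k 0 =
      Int.ofNat (pvCnt vec_sch vec_stagesize "C" m k)) ∧
    (∀ k : Nat, (pvFoldA vec_sch vec_stagesize (sch_limit + 1).toNat m).2.1.getD k 0 =
      Int.ofNat (pvCnt vec_sch vec_stagesize "H" m k)) ∧
    (pvFoldA vec_sch vec_stagesize (sch_limit + 1).toNat m).2.2 =
      (List.range m).map (pvValB vec_sch vec_stagesize) := by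
  induction m with
  | zero =>
    exact ⟨by simp [pvFoldA], by simp [pvFoldA], fun k => by simp [pvFoldA, pvCnt],
      fun k => by simp [pvFoldA, pvCnt], by simp [pvFoldA]⟩
  | succ m ih =>
    have hm' : m ≤ vec_sch.length := Nat.le_of_succ_le hm
    obtain ⟨hl1, hl2, hc, hh, hacc⟩ := ih hm'
    have hmlt : m < vec_sch.length := hm
    rw [pvFoldA_succ]
    set st := pvFoldA vec_sch vec_stagesize (sch_limit + 1).toNat m with hst
    by_cases hC : vec_sch.getD m "" = "C"
    · have hpm := hpre m hmlt (Or.inl hC)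
      have hkN : pvKeyB vec_stagesize m < (sch_limit + 1).toNat := by
        have := hpm.2.2
        simp only [pvKeyB]
        omega
      have hs : pvStepA vec_sch vec_stagesize st m =
          (st.1.set (pvKeyB vec_stagesize m) (st.1.getD (pvKeyB vec_stagesize m) 0 + 1), st.2.1,
            st.2.2 ++ [st.1.getD (pvKeyB vec_stagesize m) 0 % 2]) := by
        simp only [pvStepA, pvFlog2A, pvKeyB, hC]
        rw [if_pos trivial]
      rw [hs]
      refine ⟨by simpa using hl1, hl2, ?_, ?_, ?_⟩
      · intro k
        rw [pv_getD_set, pvCnt_succ]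
        rcases Decidable.em (pvKeyB vec_stagesize m = k) with rfl | hne
        · rw [if_pos ⟨rfl, by rw [hl1]; exact hkN⟩, if_pos ⟨hC, rfl⟩, hc]
          push_cast [Int.ofNat_eq_natCast]; ring
        · rw [if_neg (fun hcon => hne hcon.1), if_neg (fun hcon => hne hcon.2), hc]
          simp
      · intro k
        rw [pvCnt_succ, if_neg (fun hcon => by rw [hC] at hcon; exact absurd hcon.1 (by decide)), hh]
        simp
      · have hC' : vec_sch[m]?.getD "" = "C" := hC
        rw [hacc, List.range_succ, List.map_append, hc]
        simp [pvValB, hC', pvCnt]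
    · by_cases hH : vec_sch.getD m "" = "H"
      · have hpm := hpre m hmlt (Or.inr hH)
        have hkN : pvKeyB vec_stagesize m < (sch_limit + 1).toNat := by
          have := hpm.2.2
          simp only [pvKeyB]
          omega
        have hs : pvStepA vec_sch vec_stagesize st m =
            (st.1, st.2.1.set (pvKeyB vec_stagesize m) (st.2.1.getD (pvKeyB vec_stagesize m) 0 + 1),
              st.2.2 ++ [st.2.1.getD (pvKeyB vec_stagesize m) 0 % 2]) := by
          simp only [pvStepA, pvFlog2A, pvKeyB, hH]
          rw [if_neg (by decide), if_pos trivial]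
        rw [hs]
        refine ⟨hl1, by simpa using hl2, ?_, ?_, ?_⟩
        · intro k
          rw [pvCnt_succ, if_neg (fun hcon => by rw [hH] at hcon; exact absurd hcon.1 (by decide)), hc]
          simp
        · intro k
          rw [pv_getD_set, pvCnt_succ]
          rcases Decidable.em (pvKeyB vec_stagesize m = k) with rfl | hne
          · rw [if_pos ⟨rfl, by rw [hl2]; exact hkN⟩, if_pos ⟨hH, rfl⟩, hh]
            push_cast [Int.ofNat_eq_natCast]; ring
          · rw [if_neg (fun hcon => hne hcon.1), if_neg (fun hcon => hne hcon.2), hh]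
            simp
        · have hH' : vec_sch[m]?.getD "" = "H" := hH
          rw [hacc, List.range_succ, List.map_append, hh]
          simp [pvValB, hH', pvCnt]
      · have hs : pvStepA vec_sch vec_stagesize st m = (st.1, st.2.1, st.2.2 ++ [(0 : Int)]) := by
          simp only [pvStepA]
          rw [if_neg hC, if_neg hH]
        rw [hs]
        refine ⟨hl1, hl2, ?_, ?_, ?_⟩
        · intro k
          rw [pvCnt_succ, if_neg (fun hcon => hC hcon.1), hc]
          simp
        · intro k
          rw [pvCnt_succ, if_neg (fun hcon => hH hcon.1), hh]
          simp
        · have hC' : ¬ (vec_sch[m]?.getD "" = "C") := hC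
          have hH' : ¬ (vec_sch[m]?.getD "" = "H") := hH
          rw [hacc, List.range_succ, List.map_append]
          simp [pvValB, hC', hH']

-- ===== VERDICT (by name: the statement is the Claim_ definition above) =====
theorem create_decoding_direction_spec : Claim_equal_create_decoding_direction := by
  intro vec_sch vec_stagesize sch_limit _ hpre
  have h := pvInvariant vec_sch vec_stagesize sch_limit hpre vec_sch.length le_rfl
  unfold Spec_create_decoding_direction create_decoding_direction create_decoding_direction_alt
  exact h.2.2.2.2
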